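-- pv_equiv track=rewrite | github.com/WGabrielCode/Algorithms_DataStructures | Introduction_to_ComputerScience/Others/3.py | allin1
-- ===== SOURCE A (Python) =====
-- def allin1( x ) :
-- 	min_sum = float( 'inf' )
-- 	best_pair = None
--
-- 	for i in range( 1, x ) :
-- 		for j in range( 1, x ) :
-- 			a, b = i, j
--
-- 			while b <= x :
-- 				a, b = b, a + b
-- 				if b == x :
-- 					if min_sum > i + j :
-- 						min_sum = i + j
-- 						best_pair = (i, j)
-- 	return best_pair
-- ===== SOURCE B (Python) =====
-- def allin1(x):
--     # Enumerate Fibonacci coefficient pairs (p, q) = (F_k, F_{k+1}) and solve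
--     # p*i + q*j = x for positive i, j; keep the (sum, i)-lexicographically least pair.
--     best = None  # (i + j, i, j)
--     p, q = 1, 1
--     while p + q <= x:
--         i = 1
--         while p * i + q <= x:
--             r = x - p * i
--             if r % q == 0:
--                 j = r // q
--                 if best is None or (i + j, i) < (best[0], best[1]):
--                     best = (i + j, i, j)
--             i += 1
--         p, q = q, p + q
--     return None if best is None else (best[1], best[2])
-- ===== Notes on version B (the rewrite author's own statement) =====
-- stated objective: faster
-- what changed: Instead of running a Fibonacci-style loop for every pair (i,j) in [1,x)^2, B enumerates the Fibonacci coefficient pairs (F_k,F_{k+1}) and for each solves F_k*i+F_{k+1}*j=x by divisibility, keeping the (sum,i)-lexicographically least solution.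
import Mathlib
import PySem

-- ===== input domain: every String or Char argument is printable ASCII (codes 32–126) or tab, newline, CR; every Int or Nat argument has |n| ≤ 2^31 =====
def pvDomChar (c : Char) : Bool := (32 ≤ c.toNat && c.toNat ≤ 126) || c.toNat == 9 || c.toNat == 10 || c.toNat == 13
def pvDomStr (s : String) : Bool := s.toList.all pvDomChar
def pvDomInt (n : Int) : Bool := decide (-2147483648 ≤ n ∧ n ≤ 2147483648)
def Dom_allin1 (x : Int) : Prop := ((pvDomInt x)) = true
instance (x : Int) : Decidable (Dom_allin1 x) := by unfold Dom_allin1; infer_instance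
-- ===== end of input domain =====

-- B replaces A's scan of all pairs (i,j) by enumerating Fibonacci coefficient pairs and
-- solving F_k*i + F_{k+1}*j = x by divisibility (faster: O(x log x) vs O(x^2 log x)).

-- ===== PORT A =====
-- the body of "if b == x: if min_sum > i+j: ..." (state = (min_sum as Option Int, best_pair))
def updA (i j : Int) (st : Option Int × Option (Int × Int)) : Option Int × Option (Int × Int) :=
  match st.1 with
  | none => (some (i + j), some (i, j))
  | some m => if i + j < m then (some (i + j), some (i, j)) else st

-- the "while b <= x" loop; the outer dite is only a totality guard (true at every call site)
def whileA (x i j a b : Int) (st : Option Int × Option (Int × Int)) :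
    Option Int × Option (Int × Int) :=
  if hab : 1 ≤ a ∧ 1 ≤ b then
    if h : b ≤ x then
      whileA x i j b (a + b) (if a + b = x then updA i j st else st)
    else st
  else st
termination_by (x + 1 - b).toNat
decreasing_by omega

def allin1 (x : Int) : Option (List Int) :=
  let st := (PySem.List.pyRange 1 x 1).foldl (fun st i =>
      (PySem.List.pyRange 1 x 1).foldl (fun st j => whileA x i j i j st) st)
    ((none : Option Int), (none : Option (Int × Int)))
  match st.2 with
  | none => none
  | some (i, j) => some [i, j]

-- ===== PORT B =====
-- "if best is None or (i + j, i) < (best[0], best[1]): best = (i + j, i, j)"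
def updB (s i j : Int) (best : Option (Int × Int × Int)) : Option (Int × Int × Int) :=
  match best with
  | none => some (s, i, j)
  | some b => if s < b.1 ∨ (s = b.1 ∧ i < b.2.1) then some (s, i, j) else best

-- inner "while p * i + q <= x" loop; outer dite is only a totality guard (true at call sites)
def innerB (x p q i : Int) (best : Option (Int × Int × Int)) : Option (Int × Int × Int) :=
  if hpq : 1 ≤ p ∧ 1 ≤ q then
    if h : p * i + q ≤ x then
      innerB x p q (i + 1)
        (if PySem.Int.mod (x - p * i) q = 0 then
          updB (i + PySem.Int.floordiv (x - p * i) q) i (PySem.Int.floordiv (x - p * i) q) best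
        else best)
    else best
  else best
termination_by (x + 1 - p * i).toNat
decreasing_by have hh : p * (i + 1) = p * i + p := by ring
              omega

-- outer "while p + q <= x" loop
def outerB (x p q : Int) (best : Option (Int × Int × Int)) : Option (Int × Int × Int) :=
  if hpq : 1 ≤ p ∧ 1 ≤ q then
    if h : p + q ≤ x then
      outerB x q (p + q) (innerB x p q 1 best)
    else best
  else best
termination_by (x + 1 - (p + q)).toNat
decreasing_by omega

def allin1_alt (x : Int) : Option (List Int) :=
  match outerB x 1 1 none with
  | none => none
  | some (_, i, j) => some [i, j]

-- ===== PRECONDITION & SPEC =====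
def Spec_allin1 (x : Int) (out : Option (List Int)) : Prop := out = allin1_alt x
instance (x : Int) (out : Option (List Int)) : Decidable (Spec_allin1 x out) := by unfold Spec_allin1; infer_instance

-- ===== CLAIM (what is proved, stated in full; the proofs are below) =====
def Claim_equal_allin1 : Prop := ∀ (x : Int), Dom_allin1 x → Spec_allin1 x (allin1 x)

-- ===== LEMMAS AND PROOFS =====

-- Fibonacci numbers (F_0 = 0, F_1 = 1) over Int
def fibZ : Nat → Int
  | 0 => 0
  | 1 => 1
  | n + 2 => fibZ n + fibZ (n + 1)

lemma fibZ_nonneg_pos : ∀ k : Nat, 0 ≤ fibZ k ∧ 1 ≤ fibZ (k + 1) := by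
  intro k
  induction k with
  | zero => simp [fibZ]
  | succ n ih =>
    refine ⟨by omega, ?_⟩
    show 1 ≤ fibZ n + fibZ (n + 1)
    omega

lemma fibZ_pos {k : Nat} (hk : 1 ≤ k) : 1 ≤ fibZ k := by
  obtain ⟨m, rfl⟩ := Nat.exists_eq_add_of_le hk
  have := fibZ_nonneg_pos m
  simpa [Nat.add_comm] using this.2

-- sums F_k + F_{k+1} are monotone in k
lemma fibS_mono : ∀ {k k' : Nat}, k ≤ k' → fibZ k + fibZ (k + 1) ≤ fibZ k' + fibZ (k' + 1) := by
  intro k k' h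
  induction k', h using Nat.le_induction with
  | base => exact le_refl _
  | succ n hn ih =>
    have h1 := fibZ_nonneg_pos n
    have h2 : fibZ (n + 1 + 1) = fibZ n + fibZ (n + 1) := rfl
    omega

-- the qualification predicate: (i,j) generates x
def Qual (x i j : Int) : Prop := ∃ k : Nat, 1 ≤ k ∧ fibZ k * i + fibZ (k + 1) * j = x

-- full qualifying set
def QF (x : Int) (a b : Int) : Prop := 1 ≤ a ∧ 1 ≤ b ∧ Qual x a b

-- strict key order: smaller sum, then smaller first component
def klt (i j i' j' : Int) : Prop := i + j < i' + j' ∨ (i + j = i' + j' ∧ i < i')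

-- "o is the klt-least element of S" (A's state shape / B's state shape)
def MinA (S : Int → Int → Prop) (st : Option Int × Option (Int × Int)) : Prop :=
  (st = (none, none) ∧ ∀ a b, ¬ S a b) ∨
  (∃ a b, st = (some (a + b), some (a, b)) ∧ S a b ∧
    ∀ a' b', S a' b' → (a = a' ∧ b = b') ∨ klt a b a' b')

def MinB (S : Int → Int → Prop) (best : Option (Int × Int × Int)) : Prop :=
  (best = none ∧ ∀ a b, ¬ S a b) ∨
  (∃ a b, best = some (a + b, a, b) ∧ S a b ∧
    ∀ a' b', S a' b' → (a = a' ∧ b = b') ∨ klt a b a' b')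

lemma minA_congr {S T : Int → Int → Prop} {st} (h : ∀ a b, S a b ↔ T a b)
    (hm : MinA S st) : MinA T st := by
  rcases hm with ⟨h1, h2⟩ | ⟨a, b, h1, h2, h3⟩
  · exact Or.inl ⟨h1, fun a b hT => h2 a b ((h a b).mpr hT)⟩
  · exact Or.inr ⟨a, b, h1, (h a b).mp h2, fun a' b' hT => h3 a' b' ((h a' b').mpr hT)⟩

lemma minB_congr {S T : Int → Int → Prop} {best} (h : ∀ a b, S a b ↔ T a b)
    (hm : MinB S best) : MinB T best := by
  rcases hm with ⟨h1, h2⟩ | ⟨a, b, h1, h2, h3⟩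
  · exact Or.inl ⟨h1, fun a b hT => h2 a b ((h a b).mpr hT)⟩
  · exact Or.inr ⟨a, b, h1, (h a b).mp h2, fun a' b' hT => h3 a' b' ((h a' b').mpr hT)⟩

lemma minA_add {S : Int → Int → Prop} {st} (i j : Int)
    (h : MinA S st) (hlex : ∀ a b, S a b → a < i ∨ (a = i ∧ b < j)) :
    MinA (fun a b => S a b ∨ (a = i ∧ b = j)) (updA i j st) := by
  rcases h with ⟨h1, h2⟩ | ⟨a, b, h1, h2, h3⟩
  · right
    refine ⟨i, j, by simp [updA, h1], Or.inr ⟨rfl, rfl⟩, ?_⟩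
    rintro a' b' (hS | ⟨rfl, rfl⟩)
    · exact absurd hS (h2 a' b')
    · exact Or.inl ⟨rfl, rfl⟩
  · rw [h1]
    by_cases hc : i + j < a + b
    · right
      refine ⟨i, j, by simp [updA, hc], Or.inr ⟨rfl, rfl⟩, ?_⟩
      rintro a' b' (hS | ⟨rfl, rfl⟩)
      · have h4 := h3 a' b' hS
        right; unfold klt at *; omega
      · exact Or.inl ⟨rfl, rfl⟩
    · right
      refine ⟨a, b, by simp [updA, hc], Or.inl h2, ?_⟩
      rintro a' b' (hS | ⟨rfl, rfl⟩)
      · exact h3 a' b' hS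
      · have := hlex a b h2
        unfold klt; omega

lemma minB_add {S : Int → Int → Prop} {best} (i j : Int) (h : MinB S best) :
    MinB (fun a b => S a b ∨ (a = i ∧ b = j)) (updB (i + j) i j best) := by
  rcases h with ⟨h1, h2⟩ | ⟨a, b, h1, h2, h3⟩
  · right
    refine ⟨i, j, by simp [updB, h1], Or.inr ⟨rfl, rfl⟩, ?_⟩
    rintro a' b' (hS | ⟨rfl, rfl⟩)
    · exact absurd hS (h2 a' b')
    · exact Or.inl ⟨rfl, rfl⟩
  · rw [h1]
    by_cases hc : i + j < a + b ∨ (i + j = a + b ∧ i < a)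
    · right
      refine ⟨i, j, by simp [updB, hc], Or.inr ⟨rfl, rfl⟩, ?_⟩
      rintro a' b' (hS | ⟨rfl, rfl⟩)
      · have h4 := h3 a' b' hS
        right; unfold klt at *; omega
      · exact Or.inl ⟨rfl, rfl⟩
    · right
      refine ⟨a, b, by simp [updB, hc], Or.inl h2, ?_⟩
      rintro a' b' (hS | ⟨rfl, rfl⟩)
      · exact h3 a' b' hS
      · unfold klt; omega

-- ## the while-loop of A

-- orbit of the loop state
def orb (a b : Int) : Nat → Int × Int
  | 0 => (a, b)
  | k + 1 => orb b (a + b) k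

def HitFrom (x a b : Int) : Prop := ∃ k : Nat, 1 ≤ k ∧ (orb a b k).2 = x

lemma orb_snd : ∀ (k : Nat) (a b : Int), (orb a b k).2 = fibZ k * a + fibZ (k + 1) * b := by
  intro k
  induction k with
  | zero => intro a b; simp [orb, fibZ]
  | succ n ih =>
    intro a b
    show (orb b (a + b) n).2 = _
    rw [ih]
    have h2 : fibZ (n + 2) = fibZ n + fibZ (n + 1) := rfl
    rw [h2]; ring

lemma orb_grow : ∀ (k : Nat) (a b : Int), 1 ≤ a → 1 ≤ b →
    b ≤ (orb a b k).2 ∧ (1 ≤ k → b < (orb a b k).2) := by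
  intro k
  induction k with
  | zero => intro a b _ _; simp [orb]
  | succ n ih =>
    intro a b ha hb
    have := ih b (a + b) hb (by omega)
    have h0 : orb a b (n + 1) = orb b (a + b) n := rfl
    rw [h0]
    omega

lemma hitFrom_not {x a b : Int} (ha : 1 ≤ a) (hb : 1 ≤ b) (hgt : x ≤ b) : ¬ HitFrom x a b := by
  rintro ⟨k, hk, he⟩
  have := orb_grow k a b ha hb
  omega

lemma hitFrom_shift {x a b : Int} : HitFrom x a b ↔ (a + b = x ∨ HitFrom x b (a + b)) := by
  constructor
  · rintro ⟨k, hk, he⟩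
    match k, hk with
    | 1, _ => left; simpa [orb] using he
    | (n + 2), _ =>
      right; exact ⟨n + 1, by omega, he⟩
  · rintro (he | ⟨k, hk, he⟩)
    · exact ⟨1, le_refl _, by simpa [orb] using he⟩
    · exact ⟨k + 1, by omega, he⟩

lemma hitFrom_qual {x i j : Int} : HitFrom x i j ↔ Qual x i j := by
  unfold HitFrom Qual
  constructor <;> rintro ⟨k, hk, he⟩ <;> exact ⟨k, hk, by rw [orb_snd] at *; exact he⟩

lemma whileA_unfold (x i j a b : Int) (st) (ha : 1 ≤ a) (hb : 1 ≤ b) :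
    whileA x i j a b st =
      if b ≤ x then whileA x i j b (a + b) (if a + b = x then updA i j st else st) else st := by
  rw [whileA]
  simp [ha, hb]

lemma whileA_char : ∀ (n : Nat) (x i j a b : Int) (st), (x + 1 - b).toNat ≤ n → 1 ≤ a → 1 ≤ b →
    (HitFrom x a b → whileA x i j a b st = updA i j st) ∧
    (¬ HitFrom x a b → whileA x i j a b st = st) := by
  intro n
  induction n with
  | zero =>
    intro x i j a b st hn ha hb
    rw [whileA_unfold x i j a b st ha hb, if_neg (by omega : ¬ b ≤ x)]
    exact ⟨fun h => absurd h (hitFrom_not ha hb (by omega)), fun _ => rfl⟩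
  | succ n ih =>
    intro x i j a b st hn ha hb
    rw [whileA_unfold x i j a b st ha hb]
    by_cases hbx : b ≤ x
    · rw [if_pos hbx]
      have hb' : 1 ≤ a + b := by omega
      have hn' : (x + 1 - (a + b)).toNat ≤ n := by omega
      by_cases he : a + b = x
      · rw [if_pos he]
        have hnohit : ¬ HitFrom x b (a + b) := hitFrom_not hb hb' (by omega)
        have hhit : HitFrom x a b := hitFrom_shift.mpr (Or.inl he)
        rw [(ih x i j b (a + b) (updA i j st) hn' hb hb').2 hnohit]
        exact ⟨fun _ => rfl, fun hn2 => absurd hhit hn2⟩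
      · rw [if_neg he]
        have hiff : HitFrom x a b ↔ HitFrom x b (a + b) := by
          rw [hitFrom_shift]; tauto
        obtain ⟨ih1, ih2⟩ := ih x i j b (a + b) st hn' hb hb'
        exact ⟨fun h => ih1 (hiff.mp h), fun h => ih2 (fun h2 => h (hiff.mpr h2))⟩
    · rw [if_neg hbx]
      exact ⟨fun h => absurd h (hitFrom_not ha hb (by omega)), fun _ => rfl⟩

lemma whileA_qual {x i j : Int} (hi : 1 ≤ i) (hj : 1 ≤ j) (st) (h : Qual x i j) :
    whileA x i j i j st = updA i j st :=
  (whileA_char (x + 1 - j).toNat x i j i j st (le_refl _) hi hj).1 (hitFrom_qual.mpr h)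

lemma whileA_nqual {x i j : Int} (hi : 1 ≤ i) (hj : 1 ≤ j) (st) (h : ¬ Qual x i j) :
    whileA x i j i j st = st :=
  (whileA_char (x + 1 - j).toNat x i j i j st (le_refl _) hi hj).2 (fun hh => h (hitFrom_qual.mp hh))

-- qualifying pairs are bounded
lemma qual_bounds {x a b : Int} (ha : 1 ≤ a) (hb : 1 ≤ b) (h : Qual x a b) : a + b ≤ x := by
  obtain ⟨k, hk, he⟩ := h
  have h1 : 1 ≤ fibZ k := fibZ_pos hk
  have h2 : 1 ≤ fibZ (k + 1) := fibZ_pos (by omega)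
  nlinarith

-- ## A's nested folds

-- pairs already processed when the inner loop is at (i, j)
def SA (x i j : Int) (a b : Int) : Prop :=
  1 ≤ a ∧ 1 ≤ b ∧ Qual x a b ∧ (a < i ∨ (a = i ∧ b < j))

-- pairs processed when the outer loop is at i
def SArow (x i : Int) (a b : Int) : Prop := 1 ≤ a ∧ 1 ≤ b ∧ Qual x a b ∧ a < i

lemma SA_stop {x i jlo : Int} (hx : x ≤ jlo) (a b : Int) : SA x i jlo a b ↔ SA x i x a b := by
  unfold SA
  constructor <;> rintro ⟨h1, h2, h3, h4⟩ <;>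
    exact ⟨h1, h2, h3, by have := qual_bounds h1 h2 h3; omega⟩

lemma foldJ : ∀ (n : Nat) (x i jlo : Int) (st), (x - jlo).toNat ≤ n → 1 ≤ i → 1 ≤ jlo →
    MinA (SA x i jlo) st →
    MinA (SA x i x) ((PySem.List.pyRange jlo x 1).foldl (fun st j => whileA x i j i j st) st) := by
  intro n
  induction n with
  | zero =>
    intro x i jlo st hn hi hj hm
    rw [PySem.List.pyRange_one_eq_nil (by omega)]
    exact minA_congr (SA_stop (by omega)) hm
  | succ n ih =>
    intro x i jlo st hn hi hj hm
    by_cases hxj : x ≤ jlo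
    · rw [PySem.List.pyRange_one_eq_nil (by omega)]
      exact minA_congr (SA_stop hxj) hm
    · rw [PySem.List.pyRange_one_cons (by omega)]
      simp only [List.foldl_cons]
      have hstep : MinA (SA x i (jlo + 1)) (whileA x i jlo i jlo st) := by
        by_cases hq : Qual x i jlo
        · rw [whileA_qual hi hj _ hq]
          refine minA_congr (fun a b => ?_) (minA_add i jlo hm (fun a b hab => hab.2.2.2))
          unfold SA
          constructor
          · rintro (⟨h1, h2, h3, h4⟩ | ⟨rfl, rfl⟩)
            · exact ⟨h1, h2, h3, by omega⟩
            · exact ⟨hi, hj, hq, by omega⟩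
          · rintro ⟨h1, h2, h3, h4⟩
            rcases h4 with h4 | ⟨rfl, h4⟩
            · exact Or.inl ⟨h1, h2, h3, Or.inl h4⟩
            · by_cases hbj : b = jlo
              · exact Or.inr ⟨rfl, hbj⟩
              · exact Or.inl ⟨h1, h2, h3, Or.inr ⟨rfl, by omega⟩⟩
        · rw [whileA_nqual hi hj _ hq]
          refine minA_congr (fun a b => ?_) hm
          unfold SA
          constructor
          · rintro ⟨h1, h2, h3, h4⟩
            exact ⟨h1, h2, h3, by omega⟩
          · rintro ⟨h1, h2, h3, h4⟩
            refine ⟨h1, h2, h3, ?_⟩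
            rcases h4 with h4 | ⟨rfl, h4⟩
            · exact Or.inl h4
            · rcases eq_or_lt_of_le (by omega : b ≤ jlo) with rfl | hlt
              · exact absurd h3 hq
              · exact Or.inr ⟨rfl, hlt⟩
      exact ih x i (jlo + 1) _ (by omega) hi (by omega) hstep

lemma SArow_stop {x ilo : Int} (hx : x ≤ ilo) (a b : Int) : SArow x ilo a b ↔ SArow x x a b := by
  unfold SArow
  constructor <;> rintro ⟨h1, h2, h3, h4⟩ <;>
    exact ⟨h1, h2, h3, by have := qual_bounds h1 h2 h3; omega⟩

lemma foldI : ∀ (n : Nat) (x ilo : Int) (st), (x - ilo).toNat ≤ n → 1 ≤ ilo →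
    MinA (SArow x ilo) st →
    MinA (SArow x x) ((PySem.List.pyRange ilo x 1).foldl (fun st i =>
      (PySem.List.pyRange 1 x 1).foldl (fun st j => whileA x i j i j st) st) st) := by
  intro n
  induction n with
  | zero =>
    intro x ilo st hn hi hm
    rw [PySem.List.pyRange_one_eq_nil (show x ≤ ilo by omega)]
    exact minA_congr (SArow_stop (by omega)) hm
  | succ n ih =>
    intro x ilo st hn hi hm
    by_cases hxi : x ≤ ilo
    · rw [PySem.List.pyRange_one_eq_nil (show x ≤ ilo by omega)]
      exact minA_congr (SArow_stop hxi) hm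
    · rw [PySem.List.pyRange_one_cons (show ilo < x by omega)]
      simp only [List.foldl_cons]
      have h1 : MinA (SA x ilo 1) st := by
        refine minA_congr (fun a b => ?_) hm
        unfold SArow SA
        constructor
        · rintro ⟨h1, h2, h3, h4⟩; exact ⟨h1, h2, h3, Or.inl h4⟩
        · rintro ⟨h1, h2, h3, h4⟩; exact ⟨h1, h2, h3, by omega⟩
      have h2 := foldJ (x - 1).toNat x ilo 1 st (le_refl _) (by omega) (le_refl _) h1
      have h3 : MinA (SArow x (ilo + 1))
          ((PySem.List.pyRange 1 x 1).foldl (fun st j => whileA x ilo j ilo j st) st) := by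
        refine minA_congr (fun a b => ?_) h2
        unfold SA SArow
        constructor
        · rintro ⟨h1, h2, h3, h4⟩; exact ⟨h1, h2, h3, by omega⟩
        · rintro ⟨h1, h2, h3, h4⟩
          refine ⟨h1, h2, h3, ?_⟩
          have := qual_bounds h1 h2 h3
          omega
      exact ih x (ilo + 1) _ (by omega) (by omega) h3

lemma A_min (x : Int) :
    MinA (QF x) ((PySem.List.pyRange 1 x 1).foldl (fun st i =>
      (PySem.List.pyRange 1 x 1).foldl (fun st j => whileA x i j i j st) st)
      ((none : Option Int), (none : Option (Int × Int)))) := by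
  have h0 : MinA (SArow x 1) ((none : Option Int), (none : Option (Int × Int))) := by
    left
    refine ⟨rfl, ?_⟩
    rintro a b ⟨h1, _, _, h4⟩
    omega
  refine minA_congr (fun a b => ?_) (foldI (x - 1).toNat x 1 _ (le_refl _) (le_refl _) h0)
  unfold SArow QF
  constructor
  · rintro ⟨h1, h2, h3, _⟩; exact ⟨h1, h2, h3⟩
  · rintro ⟨h1, h2, h3⟩
    exact ⟨h1, h2, h3, by have := qual_bounds h1 h2 h3; omega⟩

-- ## B's loops

-- solutions with Fibonacci index below K
def SB (x : Int) (K : Nat) (a b : Int) : Prop :=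
  1 ≤ a ∧ 1 ≤ b ∧ ∃ k : Nat, 1 ≤ k ∧ k < K ∧ fibZ k * a + fibZ (k + 1) * b = x

-- plus the row-K solutions with first component below i0
def SBi (x : Int) (K : Nat) (i0 : Int) (a b : Int) : Prop :=
  SB x K a b ∨ (1 ≤ a ∧ 1 ≤ b ∧ a < i0 ∧ fibZ K * a + fibZ (K + 1) * b = x)

lemma innerB_unfold (x p q i : Int) (best) (hp : 1 ≤ p) (hq : 1 ≤ q) :
    innerB x p q i best =
      if p * i + q ≤ x then
        innerB x p q (i + 1)
          (if PySem.Int.mod (x - p * i) q = 0 then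
            updB (i + PySem.Int.floordiv (x - p * i) q) i (PySem.Int.floordiv (x - p * i) q) best
          else best)
      else best := by
  rw [innerB]
  simp [hp, hq]

-- the inner loop has exhausted row K: no row-K solution has first component ≥ i0
lemma SBi_stop {x : Int} {K : Nat} {i0 : Int} (hK : 1 ≤ K) (hstop : x < fibZ K * i0 + fibZ (K + 1))
    (a b : Int) : SBi x K i0 a b ↔ SB x (K + 1) a b := by
  have hp : 1 ≤ fibZ K := fibZ_pos hK
  have hq : 1 ≤ fibZ (K + 1) := fibZ_pos (by omega)
  constructor
  · rintro (⟨h1, h2, k, hk, hkK, he⟩ | ⟨h1, h2, h3, he⟩)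
    · exact ⟨h1, h2, k, hk, by omega, he⟩
    · exact ⟨h1, h2, K, hK, by omega, he⟩
  · rintro ⟨h1, h2, k, hk, hkK, he⟩
    by_cases hkK' : k < K
    · exact Or.inl ⟨h1, h2, k, hk, hkK', he⟩
    · have hkeq : k = K := by omega
      rw [hkeq] at he
      refine Or.inr ⟨h1, h2, ?_, he⟩
      by_contra hge
      have hge' : i0 ≤ a := by omega
      have e1 : fibZ K * i0 ≤ fibZ K * a := by nlinarith
      have e2 : fibZ (K + 1) ≤ fibZ (K + 1) * b := by nlinarith
      omega

lemma innerB_min : ∀ (n : Nat) (x : Int) (K : Nat) (i0 : Int) (best),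
    (x + 1 - fibZ K * i0).toNat ≤ n → 1 ≤ K → 1 ≤ i0 →
    MinB (SBi x K i0) best →
    MinB (SB x (K + 1)) (innerB x (fibZ K) (fibZ (K + 1)) i0 best) := by
  intro n
  induction n with
  | zero =>
    intro x K i0 best hn hK hi0 hm
    have hp : 1 ≤ fibZ K := fibZ_pos hK
    have hq : 1 ≤ fibZ (K + 1) := fibZ_pos (by omega)
    rw [innerB_unfold x _ _ i0 best hp hq, if_neg (by omega)]
    exact minB_congr (SBi_stop hK (by omega)) hm
  | succ n ih =>
    intro x K i0 best hn hK hi0 hm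
    have hp : 1 ≤ fibZ K := fibZ_pos hK
    have hq : 1 ≤ fibZ (K + 1) := fibZ_pos (by omega)
    rw [innerB_unfold x _ _ i0 best hp hq]
    by_cases hcond : fibZ K * i0 + fibZ (K + 1) ≤ x
    · rw [if_pos hcond]
      have hmul : fibZ K * (i0 + 1) = fibZ K * i0 + fibZ K := by ring
      have hn' : (x + 1 - fibZ K * (i0 + 1)).toNat ≤ n := by omega
      by_cases hd : PySem.Int.mod (x - fibZ K * i0) (fibZ (K + 1)) = 0
      · rw [if_pos hd]
        generalize hjdef : PySem.Int.floordiv (x - fibZ K * i0) (fibZ (K + 1)) = j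
        have hjq : j * fibZ (K + 1) = x - fibZ K * i0 := by
          have hfm := PySem.Int.floordiv_mul_add_mod (x - fibZ K * i0) (fibZ (K + 1))
          rw [hd, hjdef] at hfm
          omega
        have hj1 : 1 ≤ j := by nlinarith
        have hstep : MinB (SBi x K (i0 + 1)) (updB (i0 + j) i0 j best) := by
          refine minB_congr (fun a b => ?_) (minB_add i0 j hm)
          constructor
          · rintro (hS | ⟨rfl, rfl⟩)
            · rcases hS with hS | ⟨h1, h2, h3, he⟩
              · exact Or.inl hS
              · exact Or.inr ⟨h1, h2, by omega, he⟩
            · exact Or.inr ⟨hi0, hj1, by omega, by linarith [hjq]⟩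
          · rintro (hS | ⟨h1, h2, h3, he⟩)
            · exact Or.inl (Or.inl hS)
            · rcases lt_or_eq_of_le (show a ≤ i0 by omega) with hlt | rfl
              · exact Or.inl (Or.inr ⟨h1, h2, hlt, he⟩)
              · right
                refine ⟨rfl, ?_⟩
                have : b * fibZ (K + 1) = j * fibZ (K + 1) := by
                  have hc := mul_comm (fibZ (K + 1)) b
                  omega
                exact mul_right_cancel₀ (by omega) this
        exact ih x K (i0 + 1) _ hn' hK (by omega) hstep
      · rw [if_neg hd]
        have hstep : MinB (SBi x K (i0 + 1)) best := by
          refine minB_congr (fun a b => ?_) hm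
          constructor
          · rintro (hS | ⟨h1, h2, h3, he⟩)
            · exact Or.inl hS
            · exact Or.inr ⟨h1, h2, by omega, he⟩
          · rintro (hS | ⟨h1, h2, h3, he⟩)
            · exact Or.inl hS
            · rcases lt_or_eq_of_le (show a ≤ i0 by omega) with hlt | rfl
              · exact Or.inr ⟨h1, h2, hlt, he⟩
              · exfalso
                apply hd
                rw [PySem.Int.mod_eq_zero_iff_dvd]
                exact ⟨b, by omega⟩
        exact ih x K (i0 + 1) _ hn' hK (by omega) hstep
    · rw [if_neg hcond]
      exact minB_congr (SBi_stop hK (by omega)) hm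

lemma outerB_unfold (x p q : Int) (best) (hp : 1 ≤ p) (hq : 1 ≤ q) :
    outerB x p q best =
      if p + q ≤ x then outerB x q (p + q) (innerB x p q 1 best) else best := by
  rw [outerB]
  simp [hp, hq]

-- every Fibonacci index ≥ K is out of reach once F_K + F_{K+1} > x
lemma SB_stop {x : Int} {K : Nat} (hK : 1 ≤ K) (hstop : x < fibZ K + fibZ (K + 1))
    (a b : Int) : SB x K a b ↔ QF x a b := by
  constructor
  · rintro ⟨h1, h2, k, hk, hkK, he⟩
    exact ⟨h1, h2, k, hk, he⟩
  · rintro ⟨h1, h2, k, hk, he⟩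
    refine ⟨h1, h2, k, hk, ?_, he⟩
    by_contra hge
    have hKk : K ≤ k := by omega
    have hp : 1 ≤ fibZ k := fibZ_pos hk
    have hq : 1 ≤ fibZ (k + 1) := fibZ_pos (by omega)
    have e1 : fibZ k ≤ fibZ k * a := by nlinarith
    have e2 : fibZ (k + 1) ≤ fibZ (k + 1) * b := by nlinarith
    have e3 := fibS_mono hKk
    omega

lemma outerB_min : ∀ (n : Nat) (x : Int) (K : Nat) (best),
    (x + 1 - (fibZ K + fibZ (K + 1))).toNat ≤ n → 1 ≤ K →
    MinB (SB x K) best → MinB (QF x) (outerB x (fibZ K) (fibZ (K + 1)) best) := by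
  intro n
  induction n with
  | zero =>
    intro x K best hn hK hm
    have hp : 1 ≤ fibZ K := fibZ_pos hK
    have hq : 1 ≤ fibZ (K + 1) := fibZ_pos (by omega)
    rw [outerB_unfold x _ _ best hp hq, if_neg (by omega)]
    exact minB_congr (SB_stop hK (by omega)) hm
  | succ n ih =>
    intro x K best hn hK hm
    have hp : 1 ≤ fibZ K := fibZ_pos hK
    have hq : 1 ≤ fibZ (K + 1) := fibZ_pos (by omega)
    rw [outerB_unfold x _ _ best hp hq]
    by_cases hcond : fibZ K + fibZ (K + 1) ≤ x
    · rw [if_pos hcond]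
      have h1 : MinB (SBi x K 1) best := by
        refine minB_congr (fun a b => ?_) hm
        constructor
        · exact fun hS => Or.inl hS
        · rintro (hS | ⟨h1, h2, h3, _⟩)
          · exact hS
          · omega
      have h2 := innerB_min (x + 1 - fibZ K * 1).toNat x K 1 best (le_refl _) hK (le_refl _) h1
      have hfib2 : fibZ (K + 1 + 1) = fibZ K + fibZ (K + 1) := rfl
      have h3 := ih x (K + 1) _ (by omega) (by omega) h2
      rw [hfib2] at h3
      exact h3
    · rw [if_neg hcond]
      exact minB_congr (SB_stop hK (by omega)) hm

lemma B_min (x : Int) : MinB (QF x) (outerB x 1 1 none) := by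
  have h1 : (1 : Int) = fibZ 1 := rfl
  have h2 : (1 : Int) = fibZ 2 := by simp [fibZ]
  have h0 : MinB (SB x 1) none := by
    left
    refine ⟨rfl, ?_⟩
    rintro a b ⟨_, _, k, hk, hk1, _⟩
    omega
  have := outerB_min (x + 1 - (fibZ 1 + fibZ 2)).toNat x 1 none (le_refl _) (le_refl _) h0
  simpa [← h1, ← h2] using this

-- ===== VERDICT (by name: the statement is the Claim_ definition above) =====
theorem allin1_spec : Claim_equal_allin1 := by
  intro x _
  unfold Spec_allin1 allin1 allin1_alt
  have hA := A_min x
  have hB := B_min x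
  rcases hA with ⟨hA1, hA2⟩ | ⟨a, b, hA1, hA2, hA3⟩ <;>
    rcases hB with ⟨hB1, hB2⟩ | ⟨a', b', hB1, hB2, hB3⟩
  · simp only [hA1, hB1]
  · exact absurd hB2 (hA2 a' b')
  · exact absurd hA2 (hB2 a b)
  · have h1 := hA3 a' b' hB2
    have h2 := hB3 a b hA2
    have hab : a = a' ∧ b = b' := by
      rcases h1 with h1 | h1
      · exact h1
      · rcases h2 with h2 | h2
        · exact ⟨h2.1.symm, h2.2.symm⟩
        · unfold klt at h1 h2; omega
    simp only [hA1, hB1, hab.1, hab.2]
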